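-- pv_equiv track=rewrite | github.com/natechased-ux/python_crypto | superbot4.py | apply_cooldown
-- ===== SOURCE A (Python) =====
-- def apply_cooldown(pred_dirs, cooldown_bars):
--     """
--     Apply cooldown to trade predictions.
--     pred_dirs: array of -1 (short), 0 (no trade), or 1 (long)
--     cooldown_bars: number of bars to skip after a trade
--     """
--     pred_dirs = pred_dirs.copy()
--     last_trade_idx = -cooldown_bars - 1
--
--     for i in range(len(pred_dirs)):
--         if pred_dirs[i] != 0 and (i - last_trade_idx) <= cooldown_bars:
--             pred_dirs[i] = 0
--         elif pred_dirs[i] != 0: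
--             last_trade_idx = i
--
--     return pred_dirs
-- ===== SOURCE B (Python) =====
-- def apply_cooldown(pred_dirs, cooldown_bars):
--     """
--     Apply cooldown to trade predictions.
--     pred_dirs: array of -1 (short), 0 (no trade), or 1 (long)
--     cooldown_bars: number of bars to skip after a trade
--     """
--     out = pred_dirs.copy()
--     n = len(out)
--     i = 0
--     while i < n:
--         if out[i] != 0:
--             # keep this trade; zero everything inside its cooldown window,
--             # then jump straight past the window
--             j = i + 1
--             while j < n and j - i <= cooldown_bars:
--                 out[j] = 0
--                 j += 1
--             i = j
--         else:
--             i += 1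
--     return out
-- ===== Notes on version B (the rewrite author's own statement) =====
-- stated objective: alternative
-- what changed: Replaces the flat per-index pass with a last_trade_idx distance check by a greedy skip-scan: each kept trade triggers an inner window loop that zeroes the next cooldown_bars entries and jumps the outer index past the window, so no last-trade state is carried.
import Mathlib
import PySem

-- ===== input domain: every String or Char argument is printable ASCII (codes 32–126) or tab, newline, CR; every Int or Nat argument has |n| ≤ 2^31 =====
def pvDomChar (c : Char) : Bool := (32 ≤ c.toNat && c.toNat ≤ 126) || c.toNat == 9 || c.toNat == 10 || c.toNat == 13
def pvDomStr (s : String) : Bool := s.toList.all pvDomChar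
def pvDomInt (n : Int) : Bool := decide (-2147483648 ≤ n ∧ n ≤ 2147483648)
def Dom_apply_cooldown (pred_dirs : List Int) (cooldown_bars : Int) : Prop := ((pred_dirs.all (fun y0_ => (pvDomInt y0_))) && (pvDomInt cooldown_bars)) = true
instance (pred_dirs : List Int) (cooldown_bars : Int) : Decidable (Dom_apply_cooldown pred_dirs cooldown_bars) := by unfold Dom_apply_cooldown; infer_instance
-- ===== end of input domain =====

-- B replaces A's flat pass with last_trade_idx state by a greedy skip-scan (keep a trade,
-- zero its cooldown window in an inner loop, jump past it); alternative decomposition, same cost.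
-- A mutates its copied local only; equivalence is about the return value.


-- ===== PORT A =====
-- one iteration of A's for-loop body (index i is always in range, so getD's default is never used)
def aStep (cooldown_bars : Int) (st : List Int × Int) (i : Nat) : List Int × Int :=
  if st.1.getD i 0 ≠ 0 ∧ ((i : Int) - st.2) ≤ cooldown_bars then (st.1.set i 0, st.2)
  else if st.1.getD i 0 ≠ 0 then (st.1, (i : Int))
  else st

def apply_cooldown (pred_dirs : List Int) (cooldown_bars : Int) : List Int :=
  ((List.range pred_dirs.length).foldl (aStep cooldown_bars)
    (pred_dirs, -cooldown_bars - 1)).1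

-- ===== PORT B =====
-- B's inner while loop: peel off the cooldown window (counter c = j - i), returning the
-- zeroed window and the untouched remainder
def splitWin (cooldown_bars : Int) : List Int → Int → List Int × List Int
  | [], _ => ([], [])
  | y :: rest, c =>
      if c ≤ cooldown_bars then
        let p := splitWin cooldown_bars rest (c + 1)
        (0 :: p.1, p.2)
      else ([], y :: rest)

theorem splitWin_len (cooldown_bars : Int) : ∀ (l : List Int) (c : Int),
    (splitWin cooldown_bars l c).2.length ≤ l.length := by
  intro l
  induction l with
  | nil => intro c; simp [splitWin]
  | cons y rest ih =>
      intro c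
      by_cases h : c ≤ cooldown_bars
      · simpa [splitWin, h] using Nat.le_succ_of_le (ih (c + 1))
      · simp [splitWin, h]

-- B's outer while loop
def altGo (cooldown_bars : Int) : List Int → List Int
  | [] => []
  | x :: rest =>
      if x ≠ 0 then
        let p := splitWin cooldown_bars rest 1
        x :: (p.1 ++ altGo cooldown_bars p.2)
      else x :: altGo cooldown_bars rest
  termination_by l => l.length
  decreasing_by
    · exact Nat.lt_succ_of_le (splitWin_len cooldown_bars rest 1)
    · simp

def apply_cooldown_alt (pred_dirs : List Int) (cooldown_bars : Int) : List Int :=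
  altGo cooldown_bars pred_dirs

-- ===== PRECONDITION & SPEC =====
def Spec_apply_cooldown (pred_dirs : List Int) (cooldown_bars : Int) (out : List Int) : Prop := out = apply_cooldown_alt pred_dirs cooldown_bars
instance (pred_dirs : List Int) (cooldown_bars : Int) (out : List Int) : Decidable (Spec_apply_cooldown pred_dirs cooldown_bars out) := by unfold Spec_apply_cooldown; infer_instance

-- ===== CLAIM (what is proved, stated in full; the proofs are below) =====
def Claim_equal_apply_cooldown : Prop := ∀ (pred_dirs : List Int) (cooldown_bars : Int), Dom_apply_cooldown pred_dirs cooldown_bars → Spec_apply_cooldown pred_dirs cooldown_bars (apply_cooldown pred_dirs cooldown_bars)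

-- ===== LEMMAS AND PROOFS =====

-- distance form of A's loop: d = i - last_trade_idx at the current element
def specA (cooldown_bars : Int) : List Int → Int → List Int
  | [], _ => []
  | x :: rest, d =>
      if x ≠ 0 ∧ d ≤ cooldown_bars then 0 :: specA cooldown_bars rest (d + 1)
      else if x ≠ 0 then x :: specA cooldown_bars rest 1
      else x :: specA cooldown_bars rest (d + 1)

theorem foldA (cooldown_bars : Int) : ∀ (l p : List Int) (last : Int),
    ((List.range' p.length l.length).foldl (aStep cooldown_bars) (p ++ l, last)).1
      = p ++ specA cooldown_bars l ((p.length : Int) - last) := by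
  intro l
  induction l with
  | nil => intro p last; simp [specA]
  | cons x rest ih =>
      intro p last
      rw [List.length_cons, List.range'_succ, List.foldl_cons]
      have hget : (p ++ x :: rest).getD p.length 0 = x := by
        simp [List.getD_eq_getElem?_getD]
      have hset : (p ++ x :: rest).set p.length 0 = p ++ 0 :: rest := by
        rw [List.set_append_right _ _ (Nat.le_refl _)]
        simp
      by_cases h1 : x ≠ 0 ∧ ((p.length : Int) - last) ≤ cooldown_bars
      · have hstep : aStep cooldown_bars (p ++ x :: rest, last) p.length
            = ((p ++ [0]) ++ rest, last) := by
          simp [aStep, hset, h1.1, h1.2]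
        have hspec : specA cooldown_bars (x :: rest) ((p.length : Int) - last)
            = 0 :: specA cooldown_bars rest (((p.length : Int) - last) + 1) := by
          rw [specA]; simp [h1.1, h1.2]
        have harg : (((p ++ [0]).length : Nat) : Int) - last = ((p.length : Int) - last) + 1 := by
          simp; omega
        rw [hstep, show p.length + 1 = (p ++ [0]).length by simp, ih (p ++ [0]) last,
          harg, hspec]
        simp
      · by_cases h2 : x ≠ 0
        · have hgt : ¬ ((p.length : Int) - last) ≤ cooldown_bars := by tauto
          have hstep : aStep cooldown_bars (p ++ x :: rest, last) p.length
              = ((p ++ [x]) ++ rest, (p.length : Int)) := by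
            simp [aStep, h2, hgt]
          have hspec : specA cooldown_bars (x :: rest) ((p.length : Int) - last)
              = x :: specA cooldown_bars rest 1 := by
            rw [specA]; simp [h2, hgt]
          have harg : (((p ++ [x]).length : Nat) : Int) - (p.length : Int) = 1 := by
            simp
          rw [hstep, show p.length + 1 = (p ++ [x]).length by simp, ih (p ++ [x]) _,
            harg, hspec]
          simp
        · push_neg at h2
          subst h2
          have hstep : aStep cooldown_bars (p ++ (0:Int) :: rest, last) p.length
              = ((p ++ [(0:Int)]) ++ rest, last) := by
            simp [aStep]
          have hspec : specA cooldown_bars ((0:Int) :: rest) ((p.length : Int) - last)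
              = 0 :: specA cooldown_bars rest (((p.length : Int) - last) + 1) := by
            rw [specA]; simp
          have harg : (((p ++ [(0:Int)]).length : Nat) : Int) - last
              = ((p.length : Int) - last) + 1 := by
            simp; omega
          rw [hstep, show p.length + 1 = (p ++ [(0:Int)]).length by simp,
            ih (p ++ [(0:Int)]) last, harg, hspec]
          simp

theorem splitWin_big (cooldown_bars : Int) (l : List Int) (c : Int)
    (h : ¬ c ≤ cooldown_bars) : splitWin cooldown_bars l c = ([], l) := by
  cases l with
  | nil => simp [splitWin]
  | cons y r => simp [splitWin, h]

theorem spec_split (cooldown_bars : Int) (l : List Int) (c : Int) :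
    specA cooldown_bars l c
      = (splitWin cooldown_bars l c).1 ++ altGo cooldown_bars (splitWin cooldown_bars l c).2 := by
  cases l with
  | nil => simp [specA, splitWin, altGo]
  | cons y r =>
      by_cases hc : c ≤ cooldown_bars
      · rw [specA, splitWin]
        by_cases hy : y ≠ 0
        · simp [hy, hc, spec_split cooldown_bars r (c + 1)]
        · push_neg at hy; subst hy
          simp [hc, spec_split cooldown_bars r (c + 1)]
      · rw [splitWin_big cooldown_bars _ c hc, specA, altGo]
        by_cases hy : y ≠ 0
        · simp [hy, hc, spec_split cooldown_bars r 1]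
        · push_neg at hy; subst hy
          simp [hc, spec_split cooldown_bars r (c + 1),
            splitWin_big cooldown_bars r (c + 1) (by omega : ¬ c + 1 ≤ cooldown_bars)]
  termination_by l.length

-- ===== VERDICT (by name: the statement is the Claim_ definition above) =====
theorem apply_cooldown_spec : Claim_equal_apply_cooldown := by
  intro pred_dirs cooldown_bars _
  unfold Spec_apply_cooldown apply_cooldown apply_cooldown_alt
  have h0 : List.range pred_dirs.length = List.range' (0 : Nat) pred_dirs.length := by
    simp [List.range_eq_range']
  have := foldA cooldown_bars pred_dirs [] (-cooldown_bars - 1)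
  simp only [List.nil_append, List.length_nil, Nat.cast_zero] at this
  rw [h0, this]
  rw [spec_split cooldown_bars pred_dirs (0 - (-cooldown_bars - 1))]
  rw [splitWin_big cooldown_bars pred_dirs _ (by omega)]
  simp
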